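-- pv_equiv track=rewrite | github.com/Roh-coder/newQFE | thinkDoubleTwist/plot_correlator_vuw.py | period_for_direction
-- ===== SOURCE A (Python) =====
-- def mod(a: int, n: int) -> int:
--     r = a % n
--     return r + n if r < 0 else r
--
-- def make_key(k1: int, k2: int) -> int:
--     return ((k1 & 0xFFFFFFFF) << 32) | (k2 & 0xFFFFFFFF)
--
-- def coset_key(m: int, n: int, lx: int, ly: int, tx: int, ty: int, ncell: int) -> int:
--     k1 = mod(-ly * m - tx * n, ncell)
--     k2 = mod(-ty * m + lx * n, ncell)
--     return make_key(k1, k2)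
--
-- def period_for_direction(dm: int, dn: int, lx: int, ly: int, tx: int, ty: int, ncell: int) -> int:
--     k0 = coset_key(0, 0, lx, ly, tx, ty, ncell)
--     r = 1
--     while True:
--         k = coset_key(r * dm, r * dn, lx, ly, tx, ty, ncell)
--         if k == k0:
--             return r
--         if r > ncell:
--             raise RuntimeError("Could not find period within ncell steps")
--         r += 1
-- ===== SOURCE B (Python) =====
-- # Closed form: the loop's first matching r is lcm(ncell/gcd(ncell,A), ncell/gcd(ncell,B))
-- # for the two linear coefficients A, B of r in the coset key; O(log ncell) instead of O(ncell).
-- def _gcd(a: int, b: int) -> int: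
--     a, b = abs(a), abs(b)
--     while b:
--         a, b = b, a % b
--     return a
--
-- def period_for_direction(dm: int, dn: int, lx: int, ly: int, tx: int, ty: int, ncell: int) -> int:
--     a = -ly * dm - tx * dn
--     b = -ty * dm + lx * dn
--     n = abs(ncell)
--     t1 = n // _gcd(n, a)
--     t2 = n // _gcd(n, b)
--     return t1 * t2 // _gcd(t1, t2)
-- ===== Notes on version B (the rewrite author's own statement) =====
-- stated objective: faster
-- what changed: Replaces A's linear search r = 1, 2, ... over coset keys with a closed form: the first matching r is lcm(n/gcd(n,A), n/gcd(n,B)) for the two linear coefficients A = -ly*dm - tx*dn and B = -ty*dm + lx*dn and n = |ncell|, computed with a Euclid gcd loop.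
import Mathlib
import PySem

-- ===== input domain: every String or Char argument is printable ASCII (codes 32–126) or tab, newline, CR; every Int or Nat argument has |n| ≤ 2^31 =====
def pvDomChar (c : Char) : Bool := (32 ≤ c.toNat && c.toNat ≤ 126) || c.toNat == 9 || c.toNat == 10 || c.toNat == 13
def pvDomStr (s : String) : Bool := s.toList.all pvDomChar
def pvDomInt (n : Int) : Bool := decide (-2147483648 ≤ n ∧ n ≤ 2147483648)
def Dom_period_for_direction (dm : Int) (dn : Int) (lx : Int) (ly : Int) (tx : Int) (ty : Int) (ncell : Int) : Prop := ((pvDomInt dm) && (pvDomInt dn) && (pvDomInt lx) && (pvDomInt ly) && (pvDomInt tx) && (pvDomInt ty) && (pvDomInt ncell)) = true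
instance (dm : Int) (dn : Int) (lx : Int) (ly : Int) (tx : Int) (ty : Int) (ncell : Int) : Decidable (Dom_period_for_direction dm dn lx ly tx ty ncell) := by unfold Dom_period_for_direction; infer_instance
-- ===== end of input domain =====

-- ===== PORT A =====
-- B computes A's answer in closed form via gcd/lcm instead of A's linear search (objective: faster).
-- Python's mod helper `r = a % n; return r + n if r < 0 else r` (a % n = PySem.Int.mod):
def pvPymod (a : Int) (n : Int) : Int :=
  if PySem.Int.mod a n < 0 then PySem.Int.mod a n + n else PySem.Int.mod a n

-- Python's ((k1 & 0xFFFFFFFF) << 32) | (k2 & 0xFFFFFFFF), with PySem band/bor and core Int <<<.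
def pvMakeKey (k1 : Int) (k2 : Int) : Int :=
  PySem.Int.bor ((PySem.Int.band k1 4294967295) <<< (32 : Nat)) (PySem.Int.band k2 4294967295)

def pvCosetKey (m : Int) (n : Int) (lx : Int) (ly : Int) (tx : Int) (ty : Int) (ncell : Int) : Int :=
  pvMakeKey (pvPymod (-ly * m - tx * n) ncell) (pvPymod (-ty * m + lx * n) ncell)

-- A's `while True` loop over r = 1, 2, …; Python raises RuntimeError as soon as r > ncell, so fuel
-- ncell.toNat + 2 covers every run on which Python returns; the 0 on the raise / fuel-exhaustion
-- paths is unreachable under Pre_period_for_direction.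
def pvLoopA (dm : Int) (dn : Int) (lx : Int) (ly : Int) (tx : Int) (ty : Int) (ncell : Int) (k0 : Int) : Nat → Int → Int
  | 0, _ => 0
  | fuel + 1, r =>
    if pvCosetKey (r * dm) (r * dn) lx ly tx ty ncell = k0 then r
    else if r > ncell then 0  -- Python: raise RuntimeError (outside Pre_period_for_direction)
    else pvLoopA dm dn lx ly tx ty ncell k0 fuel (r + 1)

def period_for_direction (dm : Int) (dn : Int) (lx : Int) (ly : Int) (tx : Int) (ty : Int) (ncell : Int) : Int :=
  let k0 := pvCosetKey 0 0 lx ly tx ty ncell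
  pvLoopA dm dn lx ly tx ty ncell k0 (ncell.toNat + 2) 1

-- ===== PORT B =====
-- Source B's hand-written Euclid loop `while b: a, b = b, a % b` (arguments already nonnegative).
def pvGcd : Nat → Nat → Nat
  | a, b => if h : b = 0 then a else pvGcd b (a % b)
  termination_by a b => b
  decreasing_by exact Nat.mod_lt a (Nat.pos_of_ne_zero h)

def period_for_direction_alt (dm : Int) (dn : Int) (lx : Int) (ly : Int) (tx : Int) (ty : Int) (ncell : Int) : Int :=
  let a := -ly * dm - tx * dn
  let b := -ty * dm + lx * dn
  let n := ncell.natAbs                  -- abs(ncell); _gcd's abs of its arguments is natAbs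
  let t1 := n / pvGcd n a.natAbs         -- n // _gcd(n, a)
  let t2 := n / pvGcd n b.natAbs         -- n // _gcd(n, b)
  ((t1 * t2 / pvGcd t1 t2 : Nat) : Int)  -- t1 * t2 // _gcd(t1, t2)

-- ===== PRECONDITION & SPEC =====
-- Pre_ excludes exactly the inputs on which A raises: ncell = 0 (ZeroDivisionError in `%`), and
-- ncell < 0 unless both coset-key components are already 0 at r = 1 — there the loop's `r > ncell`
-- guard fires immediately and raises RuntimeError.
def Pre_period_for_direction (dm : Int) (dn : Int) (lx : Int) (ly : Int) (tx : Int) (ty : Int) (ncell : Int) : Prop :=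
  ncell ≠ 0 ∧ (0 < ncell ∨ (ncell ∣ (-ly * dm - tx * dn) ∧ ncell ∣ (-ty * dm + lx * dn)))
instance (dm : Int) (dn : Int) (lx : Int) (ly : Int) (tx : Int) (ty : Int) (ncell : Int) : Decidable (Pre_period_for_direction dm dn lx ly tx ty ncell) := by unfold Pre_period_for_direction; infer_instance

def pvWitness_period_for_direction : Int × Int × Int × Int × Int × Int × Int := (1, 0, 0, 1, 0, 0, 4)

def Spec_period_for_direction (dm : Int) (dn : Int) (lx : Int) (ly : Int) (tx : Int) (ty : Int) (ncell : Int) (out : Int) : Prop := out = period_for_direction_alt dm dn lx ly tx ty ncell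
instance (dm : Int) (dn : Int) (lx : Int) (ly : Int) (tx : Int) (ty : Int) (ncell : Int) (out : Int) : Decidable (Spec_period_for_direction dm dn lx ly tx ty ncell out) := by unfold Spec_period_for_direction; infer_instance

-- ===== CLAIM (what is proved, stated in full; the proofs are below) =====
def Claim_equal_period_for_direction : Prop := ∀ (dm : Int) (dn : Int) (lx : Int) (ly : Int) (tx : Int) (ty : Int) (ncell : Int), Dom_period_for_direction dm dn lx ly tx ty ncell → Pre_period_for_direction dm dn lx ly tx ty ncell → Spec_period_for_direction dm dn lx ly tx ty ncell (period_for_direction dm dn lx ly tx ty ncell)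

-- ===== LEMMAS AND PROOFS =====
theorem pvBandMask (x : Int) (h1 : -4294967296 < x) (h2 : x < 4294967296) :
    0 ≤ PySem.Int.band x 4294967295 ∧ (PySem.Int.band x 4294967295 = 0 ↔ x = 0) := by
  have hm : (4294967295 : Nat) = 2 ^ 32 - 1 := by norm_num
  by_cases hx : 0 ≤ x
  · have : PySem.Int.band x 4294967295 = ((x.toNat &&& 4294967295 : Nat) : Int) := by
      simp [PySem.Int.band, hx]
    rw [this, hm, Nat.and_two_pow_sub_one_eq_mod, Nat.mod_eq_of_lt (by omega)]
    omega
  · have : PySem.Int.band x 4294967295 =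
        (((4294967295 : Nat) - ((4294967295 : Nat) &&& (-x - 1).toNat) : Nat) : Int) := by
      simp [PySem.Int.band, hx]
    rw [this, Nat.and_comm, hm, Nat.and_two_pow_sub_one_eq_mod, Nat.mod_eq_of_lt (by omega)]
    omega

theorem pvNatOrZero (x y : Nat) (h : x ||| y = 0) : x = 0 ∧ y = 0 := by
  refine ⟨Nat.eq_of_testBit_eq fun i => ?_, Nat.eq_of_testBit_eq fun i => ?_⟩ <;>
    simp only [Nat.zero_testBit] <;>
    have := congrArg (fun t => t.testBit i) h <;>
    simp only [Nat.testBit_or, Nat.zero_testBit, Bool.or_eq_false_iff] at this <;>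
    simp [this]

theorem pvMakeKey_eq_zero_iff (k1 k2 : Int)
    (b1 : -4294967296 < k1) (b2 : k1 < 4294967296)
    (b3 : -4294967296 < k2) (b4 : k2 < 4294967296) :
    pvMakeKey k1 k2 = 0 ↔ (k1 = 0 ∧ k2 = 0) := by
  obtain ⟨hc1, hi1⟩ := pvBandMask k1 b1 b2
  obtain ⟨hc2, hi2⟩ := pvBandMask k2 b3 b4
  set c1 := PySem.Int.band k1 4294967295 with hc1def
  set c2 := PySem.Int.band k2 4294967295 with hc2def
  have hsh : c1 <<< (32 : Nat) = c1 * 2 ^ 32 := Int.shiftLeft_eq c1 32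
  have hsh0 : 0 ≤ c1 * 2 ^ 32 := by positivity
  have hkey : pvMakeKey k1 k2 = (((c1 * 2 ^ 32).toNat ||| c2.toNat : Nat) : Int) := by
    rw [pvMakeKey, ← hc1def, ← hc2def, hsh]
    simp only [PySem.Int.bor]
    rw [if_pos hsh0, if_pos hc2]

  rw [hkey, ← hi1, ← hi2]
  constructor
  · intro h
    have h' : (c1 * 2 ^ 32).toNat ||| c2.toNat = 0 := by omega
    obtain ⟨ha, hb⟩ := pvNatOrZero _ _ h'
    have : c1 * 2 ^ 32 = 0 := by omega
    have : c1 = 0 := by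
      rcases mul_eq_zero.mp this with h | h
      · exact h
      · norm_num at h
    exact ⟨this, by omega⟩
  · rintro ⟨h1, h2⟩
    rw [h1, h2]; simp

theorem pvPymod_spec (a n : Int) (hn : n ≠ 0) (hlo : -2147483648 ≤ n) (hhi : n ≤ 2147483648) :
    (-4294967296 < pvPymod a n ∧ pvPymod a n < 4294967296) ∧ (pvPymod a n = 0 ↔ n ∣ a) := by
  have hdvd := PySem.Int.mod_eq_zero_iff_dvd a n
  unfold pvPymod
  rcases lt_or_gt_of_ne hn with hneg | hpos
  · obtain ⟨hb1, hb2⟩ := PySem.Int.mod_neg_bounds a hneg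
    split_ifs with h
    · refine ⟨by omega, ⟨fun hh => absurd hh (by omega), fun hd => by rw [← hdvd] at hd; omega⟩⟩
    · exact ⟨by omega, by rw [← hdvd]⟩
  · have hb1 := PySem.Int.mod_nonneg a hpos
    have hb2 := PySem.Int.mod_lt a hpos
    split_ifs with h
    · omega
    · exact ⟨⟨by omega, by omega⟩, hdvd⟩

theorem pvPymod_zero (n : Int) : pvPymod 0 n = 0 := by
  have : PySem.Int.mod 0 n = 0 := (PySem.Int.mod_eq_zero_iff_dvd 0 n).mpr ⟨0, by ring⟩
  simp [pvPymod, this]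

theorem pvKey_iff (m n lx ly tx ty ncell : Int) (hn : ncell ≠ 0)
    (hlo : -2147483648 ≤ ncell) (hhi : ncell ≤ 2147483648) :
    pvCosetKey m n lx ly tx ty ncell = pvCosetKey 0 0 lx ly tx ty ncell ↔
      (ncell ∣ (-ly * m - tx * n) ∧ ncell ∣ (-ty * m + lx * n)) := by
  have hk0 : pvCosetKey 0 0 lx ly tx ty ncell = 0 := by
    have e1 : -ly * 0 - tx * 0 = 0 := by ring
    have e2 : -ty * 0 + lx * 0 = 0 := by ring
    rw [pvCosetKey, e1, e2, pvPymod_zero]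
    decide
  obtain ⟨⟨a1, a2⟩, aiff⟩ := pvPymod_spec (-ly * m - tx * n) ncell hn hlo hhi
  obtain ⟨⟨b1, b2⟩, biff⟩ := pvPymod_spec (-ty * m + lx * n) ncell hn hlo hhi
  rw [hk0, pvCosetKey, pvMakeKey_eq_zero_iff _ _ a1 a2 b1 b2, aiff, biff]

theorem pvNatDvdMul (nn a r : Nat) (h : 0 < nn) : nn ∣ r * a ↔ nn / Nat.gcd nn a ∣ r := by
  set g := Nat.gcd nn a with hg
  have hgpos : 0 < g := Nat.gcd_pos_of_pos_left a h
  have h1 : g * (nn / g) = nn := Nat.mul_div_cancel' (Nat.gcd_dvd_left nn a)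
  have h2 : g * (a / g) = a := Nat.mul_div_cancel' (Nat.gcd_dvd_right nn a)
  have hco : (nn / g).Coprime (a / g) := Nat.coprime_div_gcd_div_gcd hgpos
  have e : g * (r * (a / g)) = r * a := by
    have : g * (r * (a / g)) = r * (g * (a / g)) := by ring
    rw [this, h2]
  constructor
  · intro hd
    have hd' : g * (nn / g) ∣ g * (r * (a / g)) := by rw [h1, e]; exact hd
    have := (Nat.mul_dvd_mul_iff_left hgpos).mp hd'
    exact hco.dvd_of_dvd_mul_right this
  · intro hd
    have hd' : nn / g ∣ r * (a / g) := Dvd.dvd.mul_right hd _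
    have hd'' : g * (nn / g) ∣ g * (r * (a / g)) := Nat.mul_dvd_mul_left g hd'
    rw [h1, e] at hd''
    exact hd''

theorem pvLoopA_eq (dm dn lx ly tx ty ncell k0 L : Int)
    (hL : 1 ≤ L) (hLn : L ≤ ncell)
    (hkey : ∀ r : Int, pvCosetKey (r * dm) (r * dn) lx ly tx ty ncell = k0 ↔ L ∣ r) :
    ∀ (fuel : Nat) (r : Int), 1 ≤ r → r ≤ L → (L - r).toNat < fuel →
      pvLoopA dm dn lx ly tx ty ncell k0 fuel r = L := by
  intro fuel
  induction fuel with
  | zero => intro r _ _ h; omega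
  | succ f ih =>
    intro r h1 h2 h3
    rw [pvLoopA]
    by_cases hk : pvCosetKey (r * dm) (r * dn) lx ly tx ty ncell = k0
    · have hdvd := (hkey r).mp hk
      have : L ≤ r := Int.le_of_dvd (by omega) hdvd
      rw [if_pos hk]
      omega
    · have hne : r ≠ L := by
        rintro rfl
        exact hk ((hkey r).mpr dvd_rfl)
      have hrL : r < L := by omega
      rw [if_neg hk, if_neg (by omega)]
      exact ih (r + 1) (by omega) (by omega) (by omega)

theorem pvGcd_eq (a b : Nat) : pvGcd a b = Nat.gcd a b := by
  induction a, b using pvGcd.induct with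
  | case1 a => simp [pvGcd]
  | case2 a b h ih =>
    rw [pvGcd, dif_neg h, ih, Nat.gcd_comm b, ← Nat.gcd_rec, Nat.gcd_comm]

theorem pv_main (dm dn lx ly tx ty ncell : Int)
    (hlo : -2147483648 ≤ ncell) (hhi : ncell ≤ 2147483648)
    (hn : ncell ≠ 0)
    (hp : 0 < ncell ∨ (ncell ∣ (-ly * dm - tx * dn) ∧ ncell ∣ (-ty * dm + lx * dn))) :
    period_for_direction dm dn lx ly tx ty ncell = period_for_direction_alt dm dn lx ly tx ty ncell := by
  set a := -ly * dm - tx * dn with ha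
  set b := -ty * dm + lx * dn with hb
  set nn := ncell.natAbs with hnn
  set t1 := nn / pvGcd nn a.natAbs with ht1
  set t2 := nn / pvGcd nn b.natAbs with ht2
  have hnpos : 0 < nn := by omega
  have halt : period_for_direction_alt dm dn lx ly tx ty ncell = ((Nat.lcm t1 t2 : Nat) : Int) := by
    rw [period_for_direction_alt]
    rw [ht1, ht2, pvGcd_eq, pvGcd_eq, pvGcd_eq]
    rfl
  -- key characterisation
  have hkey : ∀ r : Int, pvCosetKey (r * dm) (r * dn) lx ly tx ty ncell
      = pvCosetKey 0 0 lx ly tx ty ncell ↔ (ncell ∣ r * a ∧ ncell ∣ r * b) := by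
    intro r
    have e1 : -ly * (r * dm) - tx * (r * dn) = r * a := by rw [ha]; ring
    have e2 : -ty * (r * dm) + lx * (r * dn) = r * b := by rw [hb]; ring
    have := pvKey_iff (r * dm) (r * dn) lx ly tx ty ncell hn hlo hhi
    rw [e1, e2] at this
    exact this
  rcases hp with hpos | ⟨hda, hdb⟩
  · -- main case: ncell > 0
    have hnc : (nn : Int) = ncell := by omega
    have hg1 := pvGcd_eq nn a.natAbs
    have ht1d : t1 ∣ nn := by rw [ht1, pvGcd_eq]; exact Nat.div_dvd_of_dvd (Nat.gcd_dvd_left _ _)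
    have ht2d : t2 ∣ nn := by rw [ht2, pvGcd_eq]; exact Nat.div_dvd_of_dvd (Nat.gcd_dvd_left _ _)
    have ht1p : 0 < t1 := by
      rw [ht1, pvGcd_eq]
      exact Nat.div_pos (Nat.le_of_dvd hnpos (Nat.gcd_dvd_left _ _)) (Nat.gcd_pos_of_pos_left _ hnpos)
    have ht2p : 0 < t2 := by
      rw [ht2, pvGcd_eq]
      exact Nat.div_pos (Nat.le_of_dvd hnpos (Nat.gcd_dvd_left _ _)) (Nat.gcd_pos_of_pos_left _ hnpos)
    set L := Nat.lcm t1 t2 with hL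
    have hLd : L ∣ nn := Nat.lcm_dvd ht1d ht2d
    have hLp : 0 < L := Nat.pos_of_ne_zero (Nat.lcm_ne_zero (by omega) (by omega))
    have hLle : L ≤ nn := Nat.le_of_dvd hnpos hLd
    have hkey' : ∀ r : Int, pvCosetKey (r * dm) (r * dn) lx ly tx ty ncell
        = pvCosetKey 0 0 lx ly tx ty ncell ↔ ((L : Int) ∣ r) := by
      intro r
      rw [hkey r]
      have da : ncell ∣ r * a ↔ t1 ∣ r.natAbs := by
        rw [← hnc, Int.ofNat_dvd_left, Int.natAbs_mul, pvNatDvdMul _ _ _ hnpos, ht1, pvGcd_eq]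
      have db : ncell ∣ r * b ↔ t2 ∣ r.natAbs := by
        rw [← hnc, Int.ofNat_dvd_left, Int.natAbs_mul, pvNatDvdMul _ _ _ hnpos, ht2, pvGcd_eq]
      rw [da, db, Int.ofNat_dvd_left, ← Nat.lcm_dvd_iff]
    rw [halt, period_for_direction]
    exact pvLoopA_eq dm dn lx ly tx ty ncell _ (L : Int)
      (by exact_mod_cast hLp) (by omega) hkey' (ncell.toNat + 2) 1 (by omega) (by exact_mod_cast hLp) (by omega)
  · -- ncell < 0: Pre_ guarantees divisibility, both sides are 1
    have h1a : ncell ∣ (1 : Int) * a := by simpa using hda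
    have h1b : ncell ∣ (1 : Int) * b := by simpa using hdb
    have hk1 : pvCosetKey ((1:Int) * dm) ((1:Int) * dn) lx ly tx ty ncell
        = pvCosetKey 0 0 lx ly tx ty ncell := (hkey 1).mpr ⟨h1a, h1b⟩
    have hloop : period_for_direction dm dn lx ly tx ty ncell = 1 := by
      rw [period_for_direction]
      have hfuel : ncell.toNat + 2 = (ncell.toNat + 1) + 1 := by omega
      rw [hfuel, pvLoopA, if_pos hk1]
    have hga : pvGcd nn a.natAbs = nn := by
      rw [pvGcd_eq]
      exact Nat.gcd_eq_left (Int.natAbs_dvd_natAbs.mpr hda)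
    have hgb : pvGcd nn b.natAbs = nn := by
      rw [pvGcd_eq]
      exact Nat.gcd_eq_left (Int.natAbs_dvd_natAbs.mpr hdb)
    have ht1e : t1 = 1 := by rw [ht1, hga, Nat.div_self hnpos]
    have ht2e : t2 = 1 := by rw [ht2, hgb, Nat.div_self hnpos]
    rw [hloop, halt, ht1e, ht2e]
    rfl

-- ===== VERDICT (by name: the statement is the Claim_ definition above) =====
theorem period_for_direction_spec : Claim_equal_period_for_direction := by
  intro dm dn lx ly tx ty ncell hdom hpre
  unfold Pre_period_for_direction at hpre
  simp only [Dom_period_for_direction, pvDomInt, Bool.and_eq_true, decide_eq_true_eq] at hdom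
  unfold Spec_period_for_direction
  exact pv_main dm dn lx ly tx ty ncell hdom.2.1 hdom.2.2 hpre.1 hpre.2
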